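-- pv_equiv track=rewrite | github.com/rhamenator/ai-scraping-defense | scripts/create_issues_from_alerts.py | group_code_scanning_alerts
-- ===== SOURCE A (Python) =====
-- from collections import defaultdict
-- from typing import Dict, List, Optional
--
-- def group_code_scanning_alerts(alerts: List[Dict]) -> Dict[str, List[Dict]]:
--     """Group code scanning alerts by rule ID and severity."""
--     grouped = defaultdict(list)
--
--     for alert in alerts:
--         rule = alert.get("rule", {})
--         rule_id = rule.get("id", "unknown")
--         severity = rule.get("severity", "unknown")
--         tool_name = alert.get("tool", {}).get("name", "unknown")
--
--         # Create a key that groups similar alerts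
--         key = f"{tool_name}:{rule_id}:{severity}"
--         grouped[key].append(alert)
--
--     return dict(grouped)
-- ===== SOURCE B (Python) =====
-- def group_code_scanning_alerts(alerts):
--     """Group code scanning alerts by rule ID and severity."""
--
--     def key(alert):
--         rule = alert.get("rule", {})
--         tool_name = alert.get("tool", {}).get("name", "unknown")
--         return f"{tool_name}:{rule.get('id', 'unknown')}:{rule.get('severity', 'unknown')}"
--
--     keyed = [(key(a), a) for a in alerts]
--     return {
--         k: [a for kk, a in keyed if kk == k]
--         for k in dict.fromkeys(k for k, _ in keyed)
--     }
-- ===== Notes on version B (the rewrite author's own statement) =====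
-- stated objective: alternative
-- what changed: Replaces A's single-pass defaultdict accumulation with a tag-dedup-filter decomposition: each alert is tagged with its key once, the key list is deduplicated in first-occurrence order (dict.fromkeys), and each group is produced by filtering the tagged list.
import Mathlib
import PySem

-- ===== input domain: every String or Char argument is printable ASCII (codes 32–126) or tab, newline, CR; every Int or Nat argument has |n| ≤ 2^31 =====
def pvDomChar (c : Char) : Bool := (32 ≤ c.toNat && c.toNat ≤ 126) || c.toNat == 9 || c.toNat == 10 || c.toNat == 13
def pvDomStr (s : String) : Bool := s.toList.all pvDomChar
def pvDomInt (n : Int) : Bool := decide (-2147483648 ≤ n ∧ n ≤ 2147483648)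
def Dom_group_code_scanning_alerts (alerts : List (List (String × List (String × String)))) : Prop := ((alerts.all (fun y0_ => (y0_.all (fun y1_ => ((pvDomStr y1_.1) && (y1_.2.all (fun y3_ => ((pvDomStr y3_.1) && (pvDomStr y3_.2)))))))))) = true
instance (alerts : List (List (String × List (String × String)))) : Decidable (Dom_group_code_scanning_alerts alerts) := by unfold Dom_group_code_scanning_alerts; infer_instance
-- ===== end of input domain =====

-- B replaces A's single-pass defaultdict accumulation by key-tagging every alert once,
-- deduplicating the tag list, and filtering the tagged list per distinct key (objective: alternative).

-- ===== PORT A =====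
-- the defaultdict(list) accumulation loop; grouped[key].append(alert) is Dict.modify key [] (· ++ [alert])
def group_code_scanning_alerts (alerts : List (List (String × List (String × String)))) : List (String × List (List (String × List (String × String)))) :=
  (alerts.foldl
    (fun grouped alert =>
      let rule := (PySem.Dict.mk alert).getD "rule" []
      let rule_id := (PySem.Dict.mk rule).getD "id" "unknown"
      let severity := (PySem.Dict.mk rule).getD "severity" "unknown"
      let tool_name := (PySem.Dict.mk ((PySem.Dict.mk alert).getD "tool" [])).getD "name" "unknown"
      let key := tool_name ++ ":" ++ rule_id ++ ":" ++ severity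
      grouped.modify key [] (fun l => l ++ [alert]))
    PySem.Dict.empty).items

-- ===== PORT B =====
-- Source B's local 'key' helper
def pvAltKey (alert : List (String × List (String × String))) : String :=
  let rule := (PySem.Dict.mk alert).getD "rule" []
  let tool_name := (PySem.Dict.mk ((PySem.Dict.mk alert).getD "tool" [])).getD "name" "unknown"
  tool_name ++ ":" ++ (PySem.Dict.mk rule).getD "id" "unknown" ++ ":" ++ (PySem.Dict.mk rule).getD "severity" "unknown"

-- tag every alert with its key, dedup the keys (dict.fromkeys), filter the tagged list per key
def group_code_scanning_alerts_alt (alerts : List (List (String × List (String × String)))) : List (String × List (List (String × List (String × String)))) :=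
  let keyed := alerts.map (fun a => (pvAltKey a, a))
  (PySem.List.dedup (keyed.map Prod.fst)).map
    (fun k => (k, (keyed.filter (fun p => p.1 == k)).map Prod.snd))

-- ===== PRECONDITION & SPEC =====
-- decidable equality for the (deeply nested) output type; plain instance search exceeds its pending depth here
def pvDecEqOut : DecidableEq (List (String × List (List (String × List (String × String))))) :=
  @instDecidableEqList _ (@instDecidableEqProd _ _ instDecidableEqString (@instDecidableEqList _ (by infer_instance)))

def Spec_group_code_scanning_alerts (alerts : List (List (String × List (String × String)))) (out : List (String × List (List (String × List (String × String))))) : Prop := out = group_code_scanning_alerts_alt alerts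
instance (alerts : List (List (String × List (String × String)))) (out : List (String × List (List (String × List (String × String))))) : Decidable (Spec_group_code_scanning_alerts alerts out) := by unfold Spec_group_code_scanning_alerts; exact pvDecEqOut out _

-- ===== CLAIM (what is proved, stated in full; the proofs are below) =====
def Claim_equal_group_code_scanning_alerts : Prop := ∀ (alerts : List (List (String × List (String × String)))), Dom_group_code_scanning_alerts alerts → Spec_group_code_scanning_alerts alerts (group_code_scanning_alerts alerts)

-- ===== LEMMAS AND PROOFS =====

-- A's loop, with the in-body key computation named: each step is modify (pvAltKey a) [] (· ++ [a])
theorem pvA_eq_fold (alerts : List (List (String × List (String × String)))) :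
    group_code_scanning_alerts alerts =
      (alerts.foldl (fun d a => d.modify (pvAltKey a) [] (fun l => l ++ [a])) PySem.Dict.empty).items := rfl

-- ===== VERDICT (by name: the statement is the Claim_ definition above) =====
theorem group_code_scanning_alerts_spec : Claim_equal_group_code_scanning_alerts := by
  intro alerts _
  unfold Spec_group_code_scanning_alerts group_code_scanning_alerts_alt
  rw [pvA_eq_fold]
  set keyed := alerts.map (fun a => (pvAltKey a, a)) with hkeyed
  have hfold : alerts.foldl (fun d a => d.modify (pvAltKey a) [] (fun l => l ++ [a])) PySem.Dict.empty
      = keyed.foldl (fun d p => d.modify p.1 [] (fun l => l ++ [p.2])) PySem.Dict.empty := by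
    rw [hkeyed, List.foldl_map]
  rw [hfold]
  set d := keyed.foldl (fun d p => d.modify p.1 [] (fun l => l ++ [p.2])) PySem.Dict.empty with hd
  have hnd : d.keys.Nodup := by
    rw [hd]
    exact PySem.Dict.nodup_keys_foldl_modify_key keyed (fun p => p.1) [] (fun d p l => l ++ [p.2])
      PySem.Dict.empty (by simp)
  have hkeys : d.keys = PySem.List.dedup (keyed.map Prod.fst) := by
    rw [hd]
    have := PySem.Dict.keys_foldl_modify_key keyed (fun p => p.1) [] (fun d p l => l ++ [p.2])
      PySem.Dict.empty
    simpa [PySem.List.dedup_eq_ofList, PySem.Dict.keys_empty, PySem.Set.update, PySem.Set.ofList] using this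
  rw [PySem.Dict.items_eq_map_keys d hnd [], hkeys]
  refine List.map_congr_left ?_
  intro k _
  have hg : d.getD k [] = (keyed.filter (fun p => p.1 == k)).map (fun p => p.2) := by
    rw [hd]
    simpa using PySem.Dict.getD_foldl_modify_append keyed PySem.Dict.empty k
  simp [hg]
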